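-- pv_equiv track=rewrite | github.com/austinmccalley/CS160-020 | assignments/assignment009/assignment9.py | is_float
-- ===== SOURCE A (Python) =====
-- def is_float(s):
--    negative = True if s[:1] == '-' else False
--    split_s = s.split('.')
--    if not len(split_s) == 2:
--        return False
--    if negative:
--        s = s[1:]
--        rd = 0
--        for c in s:
--            if not (c>='0' and c<= '9') or c == '.':
--                 if c == '.':
--                    rd += 1
--                 else:
--                     return False
--        if rd > 1:
--            return False
--        return True
--    else:
--        rd = 0
--        for c in s:
--            if not (c>='0' and c<= '9') or c == '.':
--              if c == '.':
--                  rd +=1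
--              else:
--                  return False
--        if rd > 1:
--            return False
--        return True
-- ===== SOURCE B (Python) =====
-- def is_float(s):
--     parts = s.split('.')
--     if len(parts) != 2:
--         return False
--     intpart, frac = parts
--     if intpart.startswith('-'):
--         intpart = intpart[1:]
--     return all('0' <= c <= '9' for c in intpart + frac)
-- ===== Notes on version B (the rewrite author's own statement) =====
-- stated objective: simpler
-- what changed: Replaces A's duplicated negative/positive scan-with-dot-counter loops by splitting on '.' into exactly two parts, stripping one leading '-', and a single all-digits check over the two parts.
import Mathlib
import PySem

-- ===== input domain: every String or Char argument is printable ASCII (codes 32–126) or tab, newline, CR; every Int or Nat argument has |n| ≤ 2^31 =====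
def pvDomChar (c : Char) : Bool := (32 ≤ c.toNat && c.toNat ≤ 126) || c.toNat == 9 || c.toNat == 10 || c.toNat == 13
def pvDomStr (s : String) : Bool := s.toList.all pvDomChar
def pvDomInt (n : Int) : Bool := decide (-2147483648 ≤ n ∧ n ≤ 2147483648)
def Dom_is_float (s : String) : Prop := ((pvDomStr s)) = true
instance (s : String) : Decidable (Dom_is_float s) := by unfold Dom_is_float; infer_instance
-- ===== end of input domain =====

-- B replaces A's duplicated digit-scan-with-dot-counter loops by split-on-'.'-then-all-digits; objective: simpler.

-- ===== PORT A =====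
-- the body of A's two identical for-loops (early `return False` = none, else the final rd)
def isFloatScanA : List Char → Nat → Option Nat
  | [], rd => some rd
  | c :: rest, rd =>
    if ¬ ('0' ≤ c ∧ c ≤ '9') ∨ c = '.' then
      if c = '.' then isFloatScanA rest (rd + 1) else none
    else isFloatScanA rest rd

def is_float (s : String) : Bool :=
  let negative := if PySem.Chars.slice s.toList none (some 1) = ['-'] then true else false
  let split_s := PySem.Chars.splitOn s.toList ['.']
  if ¬ (split_s.length = 2) then false
  else if negative then
    let t := PySem.Chars.slice s.toList (some 1) none   -- s = s[1:]
    match isFloatScanA t 0 with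
    | none => false
    | some rd => if rd > 1 then false else true
  else
    match isFloatScanA s.toList 0 with
    | none => false
    | some rd => if rd > 1 then false else true

-- ===== PORT B =====
def is_float_alt (s : String) : Bool :=
  match PySem.Chars.splitOn s.toList ['.'] with
  | [ip, fp] =>
      let ip' := if PySem.Chars.startswith ip ['-'] then ip.tail else ip
      (ip' ++ fp).all (fun c => decide ('0' ≤ c ∧ c ≤ '9'))
  | _ => false

-- ===== PRECONDITION & SPEC =====
def Spec_is_float (s : String) (out : Bool) : Prop := out = is_float_alt s
instance (s : String) (out : Bool) : Decidable (Spec_is_float s out) := by unfold Spec_is_float; infer_instance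

-- ===== CLAIM (what is proved, stated in full; the proofs are below) =====
def Claim_equal_is_float : Prop := ∀ (s : String), Dom_is_float s → Spec_is_float s (is_float s)

-- ===== LEMMAS AND PROOFS =====

-- structural model of s.split('.')
def mySplit : List Char → List (List Char)
  | [] => [[]]
  | c :: t =>
    if c = '.' then [] :: mySplit t
    else match mySplit t with
      | [] => [[c]]
      | p :: ps => (c :: p) :: ps

theorem mySplit_ne_nil (cs : List Char) : mySplit cs ≠ [] := by
  cases cs with
  | nil => simp [mySplit]
  | cons c t =>
    simp only [mySplit]
    split_ifs
    · simp
    · cases h : mySplit t <;> simp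

theorem splitOn_go_eq (l : List Char) : ∀ (fuel : Nat) (cur : List Char) (acc : List (List Char)),
    l.length < fuel →
    PySem.Chars.splitOn.go ['.'] fuel l cur acc =
      acc.reverse ++ (match mySplit l with
        | [] => []
        | p :: ps => (cur.reverse ++ p) :: ps) := by
  induction l with
  | nil =>
    intro fuel cur acc h
    cases fuel with
    | zero => omega
    | succ f => simp [PySem.Chars.splitOn.go, mySplit]
  | cons c rest ih =>
    intro fuel cur acc h
    cases fuel with
    | zero => omega
    | succ f =>
      by_cases hc : c = '.'
      · subst hc
        rw [show PySem.Chars.splitOn.go ['.'] (f+1) ('.' :: rest) cur acc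
              = PySem.Chars.splitOn.go ['.'] f rest [] (cur.reverse :: acc) by
            simp [PySem.Chars.splitOn.go, List.isPrefixOf]]
        rw [ih f [] (cur.reverse :: acc) (by simpa using Nat.lt_of_succ_lt_succ h)]
        simp only [mySplit]
        cases hm : mySplit rest with
        | nil => exact absurd hm (mySplit_ne_nil rest)
        | cons p ps => simp
      · rw [show PySem.Chars.splitOn.go ['.'] (f+1) (c :: rest) cur acc
              = PySem.Chars.splitOn.go ['.'] f rest (c :: cur) acc by
            simp [PySem.Chars.splitOn.go, List.isPrefixOf]
            intro h; exact absurd h.symm hc]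
        rw [ih f (c :: cur) acc (by simpa using Nat.lt_of_succ_lt_succ h)]
        simp only [mySplit, if_neg hc]
        cases hm : mySplit rest with
        | nil => exact absurd hm (mySplit_ne_nil rest)
        | cons p ps => simp

theorem splitOn_eq_mySplit (cs : List Char) :
    PySem.Chars.splitOn cs ['.'] = mySplit cs := by
  show PySem.Chars.splitOn.go ['.'] (cs.length + 1) cs [] [] = mySplit cs
  rw [splitOn_go_eq cs (cs.length + 1) [] [] (by omega)]
  cases hm : mySplit cs with
  | nil => exact absurd hm (mySplit_ne_nil cs)
  | cons p ps => simp

theorem mySplit_single : ∀ (cs x : List Char), mySplit cs = [x] → cs = x ∧ '.' ∉ x := by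
  intro cs
  induction cs with
  | nil => intro x h; simp [mySplit] at h; subst h; simp
  | cons c t ih =>
    intro x h
    simp only [mySplit] at h
    split_ifs at h with hc
    · simp at h
      exact absurd h.2 (mySplit_ne_nil t)
    · cases hm : mySplit t with
      | nil => exact absurd hm (mySplit_ne_nil t)
      | cons p ps =>
        rw [hm] at h
        simp at h
        obtain ⟨hx, hps⟩ := h
        obtain ⟨ht, hp⟩ := ih p (by rw [hm, hps])
        subst hx ht
        refine ⟨rfl, ?_⟩
        simp [hp, Ne.symm hc]

theorem mySplit_pair : ∀ (cs ip fp : List Char), mySplit cs = [ip, fp] →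
    cs = ip ++ '.' :: fp ∧ '.' ∉ ip ∧ '.' ∉ fp := by
  intro cs
  induction cs with
  | nil => intro ip fp h; simp [mySplit] at h
  | cons c t ih =>
    intro ip fp h
    simp only [mySplit] at h
    split_ifs at h with hc
    · simp at h
      obtain ⟨hip, ht⟩ := h
      obtain ⟨ht', hfp⟩ := mySplit_single t fp ht
      subst hc hip ht'
      simp [hfp]
    · cases hm : mySplit t with
      | nil => exact absurd hm (mySplit_ne_nil t)
      | cons p ps =>
        rw [hm] at h
        simp at h
        obtain ⟨hip, hps⟩ := h
        obtain ⟨ht, hp, hfp⟩ := ih p fp (by rw [hm, hps])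
        subst hip ht
        refine ⟨by simp, ?_, hfp⟩
        simp [hp, Ne.symm hc]

theorem isFloatScanA_eq (cs : List Char) : ∀ rd : Nat,
    isFloatScanA cs rd =
      if cs.all (fun c => decide ('0' ≤ c ∧ c ≤ '9') || decide (c = '.')) then
        some (rd + cs.count '.')
      else none := by
  induction cs with
  | nil => intro rd; simp [isFloatScanA]
  | cons c rest ih =>
    intro rd
    simp only [isFloatScanA]
    by_cases hc : c = '.'
    · subst hc
      rw [if_pos (Or.inr rfl), if_pos rfl, ih]
      simp [List.count_cons]
      split_ifs <;> simp <;> omega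
    · by_cases hd : '0' ≤ c ∧ c ≤ '9'
      · rw [if_neg (by simp [hc, hd]), ih]
        simp [hc, hd]
      · rw [if_pos (Or.inl hd), if_neg hc]
        simp [hc, hd]

-- A's per-character test equals plain digit-ness off the dot
theorem all_digit_or_dot (xs : List Char) (hx : '.' ∉ xs) :
    xs.all (fun c => decide ('0' ≤ c ∧ c ≤ '9') || decide (c = '.'))
      = xs.all (fun c => decide ('0' ≤ c ∧ c ≤ '9')) := by
  induction xs with
  | nil => rfl
  | cons c t ih =>
    simp only [List.mem_cons, not_or] at hx
    have hc : decide (c = '.') = false := decide_eq_false (fun h => hx.1 h.symm)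
    simp only [List.all_cons, ih hx.2, hc, Bool.or_false]

-- slice helpers on the Chars side
theorem chars_slice_take1 (xs : List Char) :
    PySem.Chars.slice xs none (some 1) = xs.take 1 := by
  simpa using PySem.List.slice_to_natCast xs 1

theorem chars_slice_tail (xs : List Char) :
    PySem.Chars.slice xs (some 1) none = xs.tail := by
  simpa using PySem.List.slice_from_one xs

-- A's loop + rd-check over u ++ '.' :: v equals B's all-digits check over u ++ v
theorem scan_branch (u v : List Char) (hu : '.' ∉ u) (hv : '.' ∉ v) :
    (match isFloatScanA (u ++ '.' :: v) 0 with
     | none => false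
     | some rd => if rd > 1 then false else true)
    = ((u ++ v).all fun c => decide ('0' ≤ c ∧ c ≤ '9')) := by
  rw [isFloatScanA_eq]
  have hcnt : (u ++ '.' :: v).count '.' = 1 := by
    simp [List.count_eq_zero.mpr hu, List.count_eq_zero.mpr hv]
  by_cases h1 : ((u ++ '.' :: v).all fun c => decide ('0' ≤ c ∧ c ≤ '9') || decide (c = '.')) = true
  · rw [if_pos h1, hcnt]
    simp only [List.all_append, List.all_cons] at h1 ⊢
    rw [all_digit_or_dot u hu, all_digit_or_dot v hv] at h1
    simp at h1 ⊢
    tauto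
  · rw [if_neg h1]
    simp only [List.all_append, List.all_cons] at h1 ⊢
    rw [all_digit_or_dot u hu, all_digit_or_dot v hv] at h1
    simp at h1 ⊢
    tauto

-- ===== VERDICT (by name: the statement is the Claim_ definition above) =====
theorem is_float_spec : Claim_equal_is_float := by
  intro s _
  unfold Spec_is_float is_float is_float_alt
  simp only [splitOn_eq_mySplit]
  cases hm : mySplit s.toList with
  | nil => exact absurd hm (mySplit_ne_nil s.toList)
  | cons p ps =>
    cases ps with
    | nil => simp
    | cons q qs =>
      cases qs with
      | cons r rs => simp
      | nil =>
        obtain ⟨hcs, hp, hq⟩ := mySplit_pair s.toList p q hm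
        rw [chars_slice_take1 s.toList, chars_slice_tail s.toList, hcs]
        rw [if_neg (show ¬¬(([p, q] : List (List Char)).length = 2) from fun h => h rfl)]
        cases p with
        | nil =>
          simp only [PySem.Chars.startswith, List.isPrefixOf, List.nil_append]
          rw [if_neg (show ¬(List.take 1 ('.' :: q) = ['-']) by simp)]
          simpa using scan_branch [] q (by simp) hq
        | cons a p' =>
          have hp' : '.' ∉ p' := fun h => hp (List.mem_cons_of_mem _ h)
          by_cases ha : a = '-'
          · subst ha
            simp only [PySem.Chars.startswith, List.isPrefixOf, List.cons_append]
            rw [if_pos (show List.take 1 ('-' :: (p' ++ '.' :: q)) = ['-'] by simp)]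
            simpa using scan_branch p' q hp' hq
          · have hne : ('-' : Char) ≠ a := fun h => ha h.symm
            simp only [PySem.Chars.startswith, List.isPrefixOf, List.cons_append]
            rw [if_neg (show ¬(List.take 1 (a :: (p' ++ '.' :: q)) = ['-']) by simp [hne.symm])]
            have := scan_branch (a :: p') q hp hq
            simp only [List.cons_append] at this
            simpa [hne] using this
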